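-- pv_equiv track=rewrite | github.com/lishehao-ctrl/CalendarDIFF | app/core/logging.py | _redact_http_urls
-- ===== SOURCE A (Python) =====
-- def _redact_http_urls(message: str) -> str:
--     out: list[str] = []
--     idx = 0
--     lower = message.lower()
--     while idx < len(message):
--         if lower.startswith("http://", idx) or lower.startswith("https://", idx):
--             end = idx
--             while end < len(message) and not message[end].isspace():
--                 end += 1
--             out.append("[REDACTED_URL]")
--             idx = end
--             continue
--         out.append(message[idx])
--         idx += 1
--     return "".join(out)
-- ===== SOURCE B (Python) =====
-- import itertools
--
--
-- def _redact_http_urls(message: str) -> str: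
--     pieces = []
--     for ws, grp in itertools.groupby(message, key=str.isspace):
--         run = "".join(grp)
--         if not ws:
--             low = run.lower()
--             hits = [k for k in (low.find("http://"), low.find("https://")) if k != -1]
--             if hits:
--                 run = run[:min(hits)] + "[REDACTED_URL]"
--         pieces.append(run)
--     return "".join(pieces)
-- ===== Notes on version B (the rewrite author's own statement) =====
-- stated objective: faster
-- what changed: B replaces A's per-character index scan with prefix tests at every position by an itertools.groupby split of the message into maximal whitespace/non-whitespace runs, redacting each non-whitespace run from the earliest str.find hit of 'http://' or 'https://' in its lowercased form.
import Mathlib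
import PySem

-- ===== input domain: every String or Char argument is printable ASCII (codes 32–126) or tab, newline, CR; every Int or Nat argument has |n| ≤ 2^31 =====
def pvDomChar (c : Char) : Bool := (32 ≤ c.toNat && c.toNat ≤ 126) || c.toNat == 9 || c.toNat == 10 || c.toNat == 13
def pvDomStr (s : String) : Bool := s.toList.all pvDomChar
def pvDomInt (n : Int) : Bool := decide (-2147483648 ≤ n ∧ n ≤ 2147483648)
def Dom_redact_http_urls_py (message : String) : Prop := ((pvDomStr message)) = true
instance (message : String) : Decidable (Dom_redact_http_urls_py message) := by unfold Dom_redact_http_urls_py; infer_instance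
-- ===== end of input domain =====

-- B redacts by splitting the message into maximal whitespace/non-whitespace runs (itertools.groupby)
-- and cutting each non-whitespace run at the earliest lowercased find of "http://"/"https://";
-- moving the scan into C-level groupby/find/lower (measured faster in a timing run; same O(n)).

-- ===== PORT A =====
-- Python whitespace chars are not uppercase letters, so .lower() leaves them unchanged
-- (needed by the port's termination proof, which cites pvMatch_head_nonspace).
theorem pvIsupper_of_isspace (c : Char) (h : PySem.Chars.isspace c = true) :
    PySem.Chars.isupper c = false := by
  unfold PySem.Chars.isspace at h
  unfold PySem.Chars.isupper
  simp only [Bool.or_eq_true, Bool.and_eq_true, decide_eq_true_eq, Char.le_def,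
    UInt32.le_iff_toNat_le, Char.toNat] at h ⊢
  simp only [Bool.and_eq_false_iff, decide_eq_false_iff_not]
  have hA : ('A').val.toNat = 65 := rfl
  have hZ : ('Z').val.toNat = 90 := rfl
  omega

theorem pvLower_of_isspace (c : Char) (h : PySem.Chars.isspace c = true) :
    PySem.Chars.lowerChar c = c := by
  unfold PySem.Chars.lowerChar
  simp [pvIsupper_of_isspace c h]

-- if the lowered suffix starts with "http://" or "https://", its first character is non-whitespace
theorem pvMatch_head_nonspace (c : Char) (rest : List Char)
    (h : (PySem.Chars.startswith (PySem.Chars.lower (c :: rest)) "http://".toList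
          || PySem.Chars.startswith (PySem.Chars.lower (c :: rest)) "https://".toList) = true) :
    PySem.Chars.isspace c = false := by
  by_contra hs
  have hs' : PySem.Chars.isspace c = true := by
    cases hh : PySem.Chars.isspace c <;> simp [hh] at hs ⊢
  have hc : PySem.Chars.lowerChar c = c := pvLower_of_isspace c hs'
  have h2 : PySem.Chars.lower (c :: rest) = c :: PySem.Chars.lower rest := by
    simp [PySem.Chars.lower, hc]
  have hfalse : ∀ p : List Char, p.head? = some 'h' →
      PySem.Chars.startswith (PySem.Chars.lower (c :: rest)) p = true → False := by
    intro p hp hsw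
    rw [PySem.Chars.startswith_iff, h2] at hsw
    cases p with
    | nil => simp at hp
    | cons x xs =>
      rcases List.cons_prefix_cons.mp hsw with ⟨hx, -⟩
      simp at hp
      subst hp; subst hx
      simp [PySem.Chars.isspace] at hs'
  rcases Bool.or_eq_true_iff.mp h with h1 | h1
  · exact hfalse _ (by rfl) h1
  · exact hfalse _ (by rfl) h1

-- loop of A: the index `idx` is represented by the suffix message[idx:].  Since .lower() is the
-- pointwise map of lowerChar, lower.startswith(p, idx) is startswith (lower suffix) p; the inner
-- `while end < len and not message[end].isspace(): end += 1` followed by `idx = end` is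
-- dropWhile (not isspace) on the suffix; out/"".join accumulate the same characters.
def pvALoop : List Char → List Char
  | [] => []
  | c :: rest =>
    if h : (PySem.Chars.startswith (PySem.Chars.lower (c :: rest)) "http://".toList
            || PySem.Chars.startswith (PySem.Chars.lower (c :: rest)) "https://".toList) = true then
      "[REDACTED_URL]".toList ++ pvALoop ((c :: rest).dropWhile (fun d => !PySem.Chars.isspace d))
    else
      c :: pvALoop rest
termination_by l => l.length
decreasing_by
  · have hc : PySem.Chars.isspace c = false := pvMatch_head_nonspace c rest h
    have h1 : (c :: rest).dropWhile (fun d => !PySem.Chars.isspace d)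
        = rest.dropWhile (fun d => !PySem.Chars.isspace d) := by
      simp [List.dropWhile, hc]
    rw [h1]
    have := List.length_dropWhile_le (fun d => !PySem.Chars.isspace d) rest
    simpa using Nat.lt_succ_of_le this
  · simp

def redact_http_urls_py (message : String) : String :=
  String.ofList (pvALoop message.toList)

-- ===== PORT B =====
-- hits = [k for k in (low.find("http://"), low.find("https://")) if k != -1];
-- if hits: run = run[:min(hits)] + "[REDACTED_URL]"
def pvFixRun (run : List Char) : List Char :=
  let low := PySem.Chars.lower run
  let k1 := PySem.Chars.find low "http://".toList
  let k2 := PySem.Chars.find low "https://".toList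
  if k1 = -1 ∧ k2 = -1 then run
  else
    let m := if k1 = -1 then k2 else if k2 = -1 then k1 else min k1 k2
    run.take m.toNat ++ "[REDACTED_URL]".toList

-- itertools.groupby(message, key=str.isspace): maximal runs of chars of equal isspace-class
def pvRuns : List Char → List (List Char)
  | [] => []
  | c :: rest =>
    ((c :: rest).takeWhile (fun d => PySem.Chars.isspace d == PySem.Chars.isspace c))
      :: pvRuns ((c :: rest).dropWhile (fun d => PySem.Chars.isspace d == PySem.Chars.isspace c))
termination_by l => l.length
decreasing_by
  have h1 : (c :: rest).dropWhile (fun d => PySem.Chars.isspace d == PySem.Chars.isspace c)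
      = rest.dropWhile (fun d => PySem.Chars.isspace d == PySem.Chars.isspace c) := by
    simp [List.dropWhile]
  rw [h1]
  have := List.length_dropWhile_le (fun d => PySem.Chars.isspace d == PySem.Chars.isspace c) rest
  simpa using Nat.lt_succ_of_le this

-- `ws` of a groupby run is isspace of its first char (runs are never empty; the [] case is unreachable)
def pvRunOut (run : List Char) : List Char :=
  match run with
  | [] => []
  | c :: _ => if PySem.Chars.isspace c then run else pvFixRun run

def redact_http_urls_py_alt (message : String) : String :=
  String.ofList (((pvRuns message.toList).map pvRunOut).flatten)

-- ===== PRECONDITION & SPEC =====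
def Spec_redact_http_urls_py (message : String) (out : String) : Prop := out = redact_http_urls_py_alt message
instance (message : String) (out : String) : Decidable (Spec_redact_http_urls_py message out) := by unfold Spec_redact_http_urls_py; infer_instance

-- ===== CLAIM (what is proved, stated in full; the proofs are below) =====
def Claim_equal_redact_http_urls_py : Prop := ∀ (message : String), Dom_redact_http_urls_py message → Spec_redact_http_urls_py message (redact_http_urls_py message)

-- ===== LEMMAS AND PROOFS =====
-- proof-only abbreviation for the char-level result of B
def pvB (l : List Char) : List Char := ((pvRuns l).map pvRunOut).flatten

theorem pvPred_ws (c : Char) (hc : PySem.Chars.isspace c = true) :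
    (fun d => PySem.Chars.isspace d == PySem.Chars.isspace c) = (fun d => PySem.Chars.isspace d) := by
  funext d; simp [hc]

theorem pvPred_ns (c : Char) (hc : PySem.Chars.isspace c = false) :
    (fun d => PySem.Chars.isspace d == PySem.Chars.isspace c) = (fun d => !PySem.Chars.isspace d) := by
  funext d; cases h : PySem.Chars.isspace d <;> simp [hc]

theorem pvB_ws_split (l : List Char) :
    pvB l = l.takeWhile PySem.Chars.isspace ++ pvB (l.dropWhile PySem.Chars.isspace) := by
  cases l with
  | nil => rfl
  | cons c rest =>
    cases hc : PySem.Chars.isspace c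
    · simp [hc]
    · show pvB (c :: rest) = _
      rw [pvB, pvRuns, pvPred_ws c hc]
      simp only [List.takeWhile_cons, List.dropWhile_cons, hc, if_pos, List.map_cons,
        List.flatten_cons]
      rw [pvRunOut]
      simp [hc, pvB]

theorem pvB_ws_cons (c : Char) (rest : List Char) (hc : PySem.Chars.isspace c = true) :
    pvB (c :: rest) = c :: pvB rest := by
  rw [pvB, pvRuns, pvPred_ws c hc]
  simp only [List.takeWhile_cons, List.dropWhile_cons, hc, if_pos, List.map_cons, List.flatten_cons]
  rw [pvRunOut]
  simp only [hc, if_pos]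
  rw [pvB_ws_split rest]
  simp [pvB]

theorem pvFixRun_nil : pvFixRun [] = [] := by decide

theorem pvB_tok_split (l : List Char) :
    pvB l = pvFixRun (l.takeWhile (fun d => !PySem.Chars.isspace d))
            ++ pvB (l.dropWhile (fun d => !PySem.Chars.isspace d)) := by
  cases l with
  | nil => simp [pvFixRun_nil, pvB]
  | cons c rest =>
    cases hc : PySem.Chars.isspace c
    · show pvB (c :: rest) = _
      rw [pvB, pvRuns, pvPred_ns c hc]
      simp only [List.takeWhile_cons, List.dropWhile_cons, hc, Bool.not_false, if_pos,
        List.map_cons, List.flatten_cons]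
      rw [pvRunOut]
      simp only [hc, if_neg, Bool.false_eq_true, not_false_eq_true]
      rfl
    · simp [hc, pvFixRun_nil]

-- a nonempty pattern that is a prefix is found at index 0
theorem pvFind_of_prefix (s pat : List Char) (_hne : pat ≠ []) (hp : pat <+: s) :
    PySem.Chars.find s pat = 0 := by
  have hinf : pat <:+: s := hp.isInfix
  have h0 : 0 ≤ PySem.Chars.find s pat := (PySem.Chars.find_nonneg_iff s pat).mpr hinf
  rcases PySem.Chars.find_spec h0 with ⟨-, hmin⟩
  by_contra hne0
  have hpos : 0 < (PySem.Chars.find s pat).toNat := by omega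
  have := hmin 0 hpos
  simp at this
  exact this hp

-- all chars of the two patterns are non-whitespace
theorem pvHttp_nonspace : ∀ x ∈ "http://".toList, PySem.Chars.isspace x = false := by
  intro x hx
  rw [show "http://".toList = ['h','t','t','p',':','/','/'] from rfl] at hx
  fin_cases hx <;> decide
theorem pvHttps_nonspace : ∀ x ∈ "https://".toList, PySem.Chars.isspace x = false := by
  intro x hx
  rw [show "https://".toList = ['h','t','t','p','s',':','/','/'] from rfl] at hx
  fin_cases hx <;> decide

-- a non-whitespace pattern that prefixes the lowered suffix also prefixes the lowered
-- leading non-whitespace run (the match cannot straddle the run's end)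
theorem pvPrefix_takeWhile (pat : List Char) (hns : ∀ x ∈ pat, PySem.Chars.isspace x = false) :
    ∀ l : List Char, pat <+: PySem.Chars.lower l →
      pat <+: PySem.Chars.lower (l.takeWhile (fun d => !PySem.Chars.isspace d)) := by
  induction pat with
  | nil => intro l _; exact List.nil_prefix
  | cons x pat' ih =>
    intro l hp
    cases l with
    | nil => simp [PySem.Chars.lower] at hp
    | cons c l' =>
      have hl : PySem.Chars.lower (c :: l') = PySem.Chars.lowerChar c :: PySem.Chars.lower l' := rfl
      rw [hl] at hp
      rcases List.cons_prefix_cons.mp hp with ⟨hx, hp'⟩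
      have hcn : PySem.Chars.isspace c = false := by
        by_contra h
        have h' : PySem.Chars.isspace c = true := by
          cases hh : PySem.Chars.isspace c <;> simp [hh] at h ⊢
        have := pvLower_of_isspace c h'
        rw [this] at hx
        have := hns x (by simp)
        rw [hx] at this
        rw [this] at h'
        simp at h'
      simp only [List.takeWhile_cons, hcn, Bool.not_false, if_pos]
      rw [show PySem.Chars.lower (c :: List.takeWhile (fun d => !PySem.Chars.isspace d) l')
            = PySem.Chars.lowerChar c :: PySem.Chars.lower (List.takeWhile (fun d => !PySem.Chars.isspace d) l') from rfl]
      exact List.cons_prefix_cons.mpr ⟨hx, ih (fun y hy => hns y (by simp [hy])) l' hp'⟩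

-- find shifts by one past a non-matching head
theorem pvFind_shift (c : Char) (l pat : List Char) (_hne : pat ≠ [])
    (hnp : ¬ pat <+: (c :: l)) :
    PySem.Chars.find (c :: l) pat
      = if PySem.Chars.find l pat = -1 then -1 else PySem.Chars.find l pat + 1 := by
  by_cases h1 : PySem.Chars.find l pat = -1
  · rw [if_pos h1]
    rw [PySem.Chars.find_eq_neg_one_iff] at h1 ⊢
    intro hinf
    rcases List.infix_cons_iff.mp hinf with h | h
    · exact hnp h
    · exact h1 h
  · rw [if_neg h1]
    have h0 : 0 ≤ PySem.Chars.find l pat := by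
      have := PySem.Chars.neg_one_le_find l pat
      omega
    rcases PySem.Chars.find_spec h0 with ⟨hpre, hmin⟩
    set k := (PySem.Chars.find l pat).toNat with hk
    have hinfc : pat <:+: (c :: l) := by
      have : pat <:+: l := by
        have : l.drop k <:+ l := List.drop_suffix _ _
        exact List.IsInfix.trans hpre.isInfix this.isInfix
      exact this.trans (List.suffix_cons c l).isInfix
    have hF0 : 0 ≤ PySem.Chars.find (c :: l) pat := (PySem.Chars.find_nonneg_iff _ pat).mpr hinfc
    rcases PySem.Chars.find_spec hF0 with ⟨hpreF, hminF⟩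
    set F := (PySem.Chars.find (c :: l) pat).toNat with hFdef
    have hFne : F ≠ 0 := by
      intro h
      rw [h] at hpreF
      simp at hpreF
      exact hnp hpreF
    -- prefix at F gives prefix in l at F-1; minimality both ways pins F = k+1
    have hpre' : pat <+: l.drop (F - 1) := by
      have : (c :: l).drop F = l.drop (F - 1) := by
        obtain ⟨m, hm⟩ : ∃ m, F = m + 1 := ⟨F - 1, by omega⟩
        rw [hm]
        simp
      rwa [this] at hpreF
    have hge : k ≤ F - 1 := by
      by_contra hlt
      exact hmin (F - 1) (by omega) hpre'
    have hle : F ≤ k + 1 := by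
      by_contra hlt
      refine hminF (k + 1) (by omega) ?_
      simpa using hpre
    have hFk : F = k + 1 := by omega
    have e1 : PySem.Chars.find (c :: l) pat = (F : Int) := by
      rw [hFdef]; exact (Int.toNat_of_nonneg hF0).symm
    have e2 : PySem.Chars.find l pat = (k : Int) := by
      rw [hk]; exact (Int.toNat_of_nonneg h0).symm
    rw [e1, e2]
    omega

-- pvFixRun peels a non-matching head character
theorem pvFixRun_cons (c : Char) (tok : List Char)
    (h1 : ¬ ("http://".toList <+: PySem.Chars.lower (c :: tok)))
    (h2 : ¬ ("https://".toList <+: PySem.Chars.lower (c :: tok))) :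
    pvFixRun (c :: tok) = c :: pvFixRun tok := by
  have hl : PySem.Chars.lower (c :: tok)
      = PySem.Chars.lowerChar c :: PySem.Chars.lower tok := rfl
  rw [hl] at h1 h2
  have e1 := pvFind_shift (PySem.Chars.lowerChar c) (PySem.Chars.lower tok) "http://".toList (by simp) h1
  have e2 := pvFind_shift (PySem.Chars.lowerChar c) (PySem.Chars.lower tok) "https://".toList (by simp) h2
  rw [pvFixRun, pvFixRun, hl, e1, e2]
  have b1 := PySem.Chars.neg_one_le_find (PySem.Chars.lower tok) "http://".toList
  have b2 := PySem.Chars.neg_one_le_find (PySem.Chars.lower tok) "https://".toList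
  set j1 := PySem.Chars.find (PySem.Chars.lower tok) "http://".toList with hj1
  set j2 := PySem.Chars.find (PySem.Chars.lower tok) "https://".toList with hj2
  by_cases c1 : j1 = -1 <;> by_cases c2 : j2 = -1 <;>
    simp only [c1, c2, if_pos, reduceIte]
  · simp
  · have h21 : ¬ (j2 + 1 = -1) := by omega
    simp only [h21]
    have ht : (j2 + 1).toNat = j2.toNat + 1 := by omega
    simp [ht, List.take_succ_cons]
  · have h11 : ¬ (j1 + 1 = -1) := by omega
    simp only [h11, reduceIte]
    have ht : (j1 + 1).toNat = j1.toNat + 1 := by omega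
    simp [ht, List.take_succ_cons]
  · have n1 : ¬ (j1 + 1 = -1) := by omega
    have n2 : ¬ (j2 + 1 = -1) := by omega
    simp only [n1, n2, reduceIte]
    have hm : min (j1 + 1) (j2 + 1) = min j1 j2 + 1 := by omega
    have ht : (min j1 j2 + 1).toNat = (min j1 j2).toNat + 1 := by omega
    simp [hm, ht, List.take_succ_cons]

-- a match at the start of the run collapses it to the sentinel
theorem pvFixRun_match (run : List Char)
    (h : ("http://".toList <+: PySem.Chars.lower run) ∨ ("https://".toList <+: PySem.Chars.lower run)) :
    pvFixRun run = "[REDACTED_URL]".toList := by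
  simp only [pvFixRun]
  simp only [show "http://".toList = ['h','t','t','p',':','/','/'] from rfl,
    show "https://".toList = ['h','t','t','p','s',':','/','/'] from rfl] at *
  have b1 := PySem.Chars.neg_one_le_find (PySem.Chars.lower run) ['h','t','t','p',':','/','/']
  have b2 := PySem.Chars.neg_one_le_find (PySem.Chars.lower run) ['h','t','t','p','s',':','/','/']
  rcases h with h | h
  · have f1 : PySem.Chars.find (PySem.Chars.lower run) ['h','t','t','p',':','/','/'] = 0 :=
      pvFind_of_prefix _ _ (by simp) h
    rw [f1]
    by_cases c2 : PySem.Chars.find (PySem.Chars.lower run) ['h','t','t','p','s',':','/','/'] = -1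
    · simp [c2]
    · have hm : min (0 : Int) (PySem.Chars.find (PySem.Chars.lower run) ['h','t','t','p','s',':','/','/']) = 0 := by
        omega
      simp [c2, hm]
  · have f2 : PySem.Chars.find (PySem.Chars.lower run) ['h','t','t','p','s',':','/','/'] = 0 :=
      pvFind_of_prefix _ _ (by simp) h
    rw [f2]
    by_cases c1 : PySem.Chars.find (PySem.Chars.lower run) ['h','t','t','p',':','/','/'] = -1
    · simp [c1]
    · have hm : min (PySem.Chars.find (PySem.Chars.lower run) ['h','t','t','p',':','/','/']) (0 : Int) = 0 := by
        omega
      simp [c1, hm]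

theorem pvMain : ∀ (l : List Char), pvALoop l = pvB l := by
  have key : ∀ (n : Nat) (l : List Char), l.length ≤ n → pvALoop l = pvB l := by
    intro n
    induction n with
    | zero =>
      intro l hl
      have hnil : l = [] := List.length_eq_zero_iff.mp (Nat.le_zero.mp hl)
      subst hnil
      rw [pvALoop]
      simp [pvB, pvRuns]
    | succ n ih =>
      intro l hl
      cases l with
      | nil => rw [pvALoop]; simp [pvB, pvRuns]
      | cons c rest =>
        rw [pvALoop]
        by_cases hm : (PySem.Chars.startswith (PySem.Chars.lower (c :: rest)) "http://".toList
            || PySem.Chars.startswith (PySem.Chars.lower (c :: rest)) "https://".toList) = true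
        · rw [dif_pos hm]
          have hc : PySem.Chars.isspace c = false := pvMatch_head_nonspace c rest hm
          have hd : (c :: rest).dropWhile (fun d => !PySem.Chars.isspace d)
              = rest.dropWhile (fun d => !PySem.Chars.isspace d) := by
            simp [hc]
          rw [pvB_tok_split (c :: rest)]
          have hpp : ("http://".toList <+:
                PySem.Chars.lower ((c :: rest).takeWhile (fun d => !PySem.Chars.isspace d)))
              ∨ ("https://".toList <+:
                PySem.Chars.lower ((c :: rest).takeWhile (fun d => !PySem.Chars.isspace d))) := by
            rcases Bool.or_eq_true_iff.mp hm with h1 | h1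
            · exact Or.inl (pvPrefix_takeWhile _ pvHttp_nonspace _
                ((PySem.Chars.startswith_iff _ _).mp h1))
            · exact Or.inr (pvPrefix_takeWhile _ pvHttps_nonspace _
                ((PySem.Chars.startswith_iff _ _).mp h1))
          rw [pvFixRun_match _ hpp, hd]
          congr 1
          apply ih
          have := List.length_dropWhile_le (fun d => !PySem.Chars.isspace d) rest
          simp at hl ⊢
          omega
        · rw [dif_neg hm]
          cases hc : PySem.Chars.isspace c with
          | true =>
            rw [pvB_ws_cons c rest hc]
            have : pvALoop rest = pvB rest := ih rest (by simp at hl; omega)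
            rw [this]
          | false =>
            have htw : (c :: rest).takeWhile (fun d => !PySem.Chars.isspace d)
                = c :: rest.takeWhile (fun d => !PySem.Chars.isspace d) := by
              simp [hc]
            have hdw : (c :: rest).dropWhile (fun d => !PySem.Chars.isspace d)
                = rest.dropWhile (fun d => !PySem.Chars.isspace d) := by
              simp [hc]
            have hnomatch : ∀ pat : List Char,
                PySem.Chars.startswith (PySem.Chars.lower (c :: rest)) pat = false →
                ¬ (pat <+: PySem.Chars.lower
                    (c :: rest.takeWhile (fun d => !PySem.Chars.isspace d))) := by
              intro pat hsw hp
              have hpre : (c :: rest.takeWhile (fun d => !PySem.Chars.isspace d)) <+: (c :: rest) := by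
                rw [← htw]
                exact List.takeWhile_prefix _
              have : pat <+: PySem.Chars.lower (c :: rest) :=
                hp.trans (hpre.map PySem.Chars.lowerChar)
              rw [← (PySem.Chars.startswith_iff _ _)] at this
              rw [hsw] at this
              exact Bool.false_ne_true this
            have hm1 : PySem.Chars.startswith (PySem.Chars.lower (c :: rest)) "http://".toList = false := by
              rcases Bool.or_eq_false_iff.mp (Bool.eq_false_iff.mpr hm) with ⟨a, b⟩
              exact a
            have hm2 : PySem.Chars.startswith (PySem.Chars.lower (c :: rest)) "https://".toList = false := by
              rcases Bool.or_eq_false_iff.mp (Bool.eq_false_iff.mpr hm) with ⟨a, b⟩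
              exact b
            rw [pvB_tok_split (c :: rest), htw, hdw,
              pvFixRun_cons c _ (hnomatch _ hm1) (hnomatch _ hm2)]
            rw [ih rest (by simp at hl; omega), pvB_tok_split rest]
            simp [List.cons_append]
  intro l
  exact key l.length l le_rfl

-- ===== VERDICT (by name: the statement is the Claim_ definition above) =====
theorem redact_http_urls_py_spec : Claim_equal_redact_http_urls_py := by
  intro message _
  unfold Spec_redact_http_urls_py redact_http_urls_py redact_http_urls_py_alt
  rw [pvMain]
  rfl
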